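-- pv_equiv track=rewrite | github.com/Keza91/warriors-nrlw-app | streamlit-app/pages/4_Season_Set_Up.py | canonical_week_sequence
-- ===== SOURCE A (Python) =====
-- TRAINING_DAY_CANON = ["D1", "D2", "D3", "D4", "D5 (Captain's Run)"]
--
-- def canonical_week_sequence(days_list):
--     """Return ordered unique training-days sequence (e.g., 'D1–D2–D4–D5 (Captain's Run)')."""
--     unique = []
--     for d in days_list:
--         d = str(d).strip()
--         if d in TRAINING_DAY_CANON and d not in unique:
--             unique.append(d)
--     order_map = {d: i for i, d in enumerate(TRAINING_DAY_CANON)}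
--     unique.sort(key=lambda x: order_map[x])
--     return "–".join(unique) if unique else "—"
-- ===== SOURCE B (Python) =====
-- TRAINING_DAY_CANON = ["D1", "D2", "D3", "D4", "D5 (Captain's Run)"]
--
-- def canonical_week_sequence(days_list):
--     """Return ordered unique training-days sequence (e.g., 'D1–D2–D4–D5 (Captain's Run)')."""
--     present = {str(d).strip() for d in days_list}
--     result = [d for d in TRAINING_DAY_CANON if d in present]
--     return "–".join(result) if result else "—"
-- ===== Notes on version B (the rewrite author's own statement) =====
-- stated objective: idiomatic
-- what changed: B builds the set of stripped inputs once and filters the fixed canonical table in order, eliminating A's per-element dedup membership scan and the final key-based sort over an enumerate-built order map.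
import Mathlib
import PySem

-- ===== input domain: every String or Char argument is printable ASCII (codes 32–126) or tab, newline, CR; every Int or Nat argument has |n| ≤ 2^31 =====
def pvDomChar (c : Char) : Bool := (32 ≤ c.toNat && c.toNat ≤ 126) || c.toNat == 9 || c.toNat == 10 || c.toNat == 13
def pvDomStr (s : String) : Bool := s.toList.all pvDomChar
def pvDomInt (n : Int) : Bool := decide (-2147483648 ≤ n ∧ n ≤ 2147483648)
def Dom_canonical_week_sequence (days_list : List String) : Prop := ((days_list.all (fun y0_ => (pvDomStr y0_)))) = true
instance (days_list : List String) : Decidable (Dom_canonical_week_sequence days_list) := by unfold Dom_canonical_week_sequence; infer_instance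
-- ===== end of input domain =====

-- B builds the stripped-input set once and filters the fixed canonical table in order (idiomatic; drops A's dedup scan and final sort).


-- module-level constant shared by both versions
def TRAINING_DAY_CANON : List String := ["D1", "D2", "D3", "D4", "D5 (Captain's Run)"]

-- ===== PORT A =====
-- loop body of A: strip, then append if canonical and not yet collected
def cwsStep (u : List String) (d : String) : List String :=
  let d := PySem.Str.strip d
  if d ∈ TRAINING_DAY_CANON ∧ d ∉ u then u ++ [d] else u

-- order_map = {d: i for i, d in enumerate(TRAINING_DAY_CANON)}
def cwsOrderMap : PySem.Dict String Int :=
  (PySem.List.enumerate TRAINING_DAY_CANON).foldl (fun m p => m.insert p.2 p.1) PySem.Dict.empty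

-- sort key: order_map[x].  getD 0 is exact: every sorted element is in TRAINING_DAY_CANON,
-- so Python's order_map[x] never raises KeyError.
def cwsKey (x : String) : Int := (cwsOrderMap.get? x).getD 0

def canonical_week_sequence (days_list : List String) : String :=
  let unique := days_list.foldl cwsStep []
  let unique := PySem.List.sorted unique cwsKey false
  if unique.isEmpty then "—" else PySem.Str.join "–" unique

-- ===== PORT B =====
def canonical_week_sequence_alt (days_list : List String) : String :=
  let present : PySem.Set String := PySem.Set.ofList (days_list.map PySem.Str.strip)
  let result := TRAINING_DAY_CANON.filter (fun d => PySem.Set.contains present d)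
  if result.isEmpty then "—" else PySem.Str.join "–" result

-- ===== PRECONDITION & SPEC =====
def Spec_canonical_week_sequence (days_list : List String) (out : String) : Prop := out = canonical_week_sequence_alt days_list
instance (days_list : List String) (out : String) : Decidable (Spec_canonical_week_sequence days_list out) := by unfold Spec_canonical_week_sequence; infer_instance

-- ===== CLAIM (what is proved, stated in full; the proofs are below) =====
def Claim_equal_canonical_week_sequence : Prop := ∀ (days_list : List String), Dom_canonical_week_sequence days_list → Spec_canonical_week_sequence days_list (canonical_week_sequence days_list)

-- ===== LEMMAS AND PROOFS =====

-- invariant of A's collecting loop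
theorem cws_fold_inv (ds : List String) (u : List String)
    (hn : u.Nodup) (hc : ∀ x ∈ u, x ∈ TRAINING_DAY_CANON) :
    (ds.foldl cwsStep u).Nodup ∧ (∀ x ∈ ds.foldl cwsStep u, x ∈ TRAINING_DAY_CANON) ∧
    (∀ x, x ∈ ds.foldl cwsStep u ↔ x ∈ u ∨ (x ∈ TRAINING_DAY_CANON ∧ x ∈ ds.map PySem.Str.strip)) := by
  induction ds generalizing u with
  | nil => simpa using ⟨hn, hc⟩
  | cons d ds ih =>
    simp only [List.foldl_cons]
    by_cases h : PySem.Str.strip d ∈ TRAINING_DAY_CANON ∧ PySem.Str.strip d ∉ u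
    · have hstep : cwsStep u d = u ++ [PySem.Str.strip d] := by
        simp [cwsStep, h]
      rw [hstep]
      have hn' : (u ++ [PySem.Str.strip d]).Nodup := by
        simp [List.nodup_append, hn]
        exact fun a ha hd => h.2 (hd ▸ ha)
      have hc' : ∀ x ∈ u ++ [PySem.Str.strip d], x ∈ TRAINING_DAY_CANON := by
        intro x hx
        rcases List.mem_append.mp hx with hx | hx
        · exact hc x hx
        · simp at hx; simpa [hx] using h.1
      obtain ⟨ih1, ih2, ih3⟩ := ih _ hn' hc'
      refine ⟨ih1, ih2, ?_⟩
      intro x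
      rw [ih3 x]
      simp only [List.mem_append, List.map_cons, List.mem_cons]
      constructor
      · rintro ((hx | hsd) | ⟨hx1, hx2⟩)
        · exact Or.inl hx
        · rcases hsd with rfl | hsd
          · exact Or.inr ⟨h.1, Or.inl rfl⟩
          · cases hsd
        · exact Or.inr ⟨hx1, Or.inr hx2⟩
      · rintro (hx | ⟨hx1, (rfl | hx2)⟩)
        · exact Or.inl (Or.inl hx)
        · exact Or.inl (Or.inr (Or.inl rfl))
        · exact Or.inr ⟨hx1, hx2⟩
    · have hstep : cwsStep u d = u := by
        simp only [cwsStep]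
        rw [if_neg h]
      rw [hstep]
      obtain ⟨ih1, ih2, ih3⟩ := ih _ hn hc
      refine ⟨ih1, ih2, ?_⟩
      intro x
      rw [ih3 x]
      simp only [List.map_cons, List.mem_cons]
      constructor
      · rintro (hx | ⟨hx1, hx2⟩)
        · exact Or.inl hx
        · exact Or.inr ⟨hx1, Or.inr hx2⟩
      · rintro (hx | ⟨hx1, (rfl | hx2)⟩)
        · exact Or.inl hx
        · have hu : PySem.Str.strip d ∈ u := by
            by_contra hu; exact h ⟨hx1, hu⟩
          exact Or.inl hu
        · exact Or.inr ⟨hx1, hx2⟩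

set_option maxHeartbeats 2000000 in
theorem canon_pairwise_key : TRAINING_DAY_CANON.Pairwise (fun a b => cwsKey a < cwsKey b) := by
  decide

set_option maxHeartbeats 2000000 in
theorem canon_nodup : TRAINING_DAY_CANON.Nodup := by decide

-- A's sorted unique list is the canonical table filtered by membership in unique
theorem cws_sorted_eq_filter (u : List String) (hn : u.Nodup)
    (hc : ∀ x ∈ u, x ∈ TRAINING_DAY_CANON) :
    PySem.List.sorted u cwsKey false = TRAINING_DAY_CANON.filter (fun x => decide (x ∈ u)) := by
  apply PySem.List.sorted_eq_of_perm_of_pairwise_lt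
  · apply (List.perm_ext_iff_of_nodup (canon_nodup.filter _) hn).mpr
    intro x
    simp only [List.mem_filter, decide_eq_true_eq]
    exact ⟨fun h => h.2, fun h => ⟨hc x h, h⟩⟩
  · exact canon_pairwise_key.filter _

-- ===== VERDICT (by name: the statement is the Claim_ definition above) =====
theorem canonical_week_sequence_spec : Claim_equal_canonical_week_sequence := by
  intro days_list _
  unfold Spec_canonical_week_sequence
  simp only [canonical_week_sequence, canonical_week_sequence_alt]
  obtain ⟨hn, hc, hm⟩ := cws_fold_inv days_list [] List.nodup_nil (by simp)
  have hs := cws_sorted_eq_filter _ hn hc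
  rw [hs]
  have hf : TRAINING_DAY_CANON.filter (fun x => decide (x ∈ days_list.foldl cwsStep []))
      = TRAINING_DAY_CANON.filter
          (fun d => PySem.Set.contains (PySem.Set.ofList (days_list.map PySem.Str.strip)) d) := by
    apply List.filter_congr
    intro x hx
    simp only [hm x]
    simp [hx]
  rw [hf]
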